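-- pv_equiv track=rewrite | github.com/sigurdvaa/adventofcode | 2018/02-Inventory-Management-System.py | rudimentary_checksum
-- ===== SOURCE A (Python) =====
-- def exactly_n_letter(string: str, n: int) -> bool:
--     chars = {}
--     for c in string:
--         if c not in chars:
--             chars[c] = 1
--         else:
--             chars[c] += 1
--     for c in chars:
--         if chars[c] == n:
--             return True
--     return False
--
-- def rudimentary_checksum(ids: list) -> int:
--     twice = 0
--     triple = 0
--     for idx in ids:
--         if exactly_n_letter(idx, 2):
--             twice += 1
--         if exactly_n_letter(idx, 3):
--             triple += 1
--     return twice * triple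
-- ===== SOURCE B (Python) =====
-- from itertools import groupby
--
-- def rudimentary_checksum(ids: list) -> int:
--     twice = 0
--     triple = 0
--     for idx in ids:
--         lens = {len(list(g)) for _, g in groupby(sorted(idx))}
--         if 2 in lens:
--             twice += 1
--         if 3 in lens:
--             triple += 1
--     return twice * triple
-- ===== Notes on version B (the rewrite author's own statement) =====
-- stated objective: idiomatic
-- what changed: Counts letter multiplicities by sorting each id and taking groupby run lengths into one set per id (one grouped scan), instead of building a hash dict and scanning it twice per id.
import Mathlib
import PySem

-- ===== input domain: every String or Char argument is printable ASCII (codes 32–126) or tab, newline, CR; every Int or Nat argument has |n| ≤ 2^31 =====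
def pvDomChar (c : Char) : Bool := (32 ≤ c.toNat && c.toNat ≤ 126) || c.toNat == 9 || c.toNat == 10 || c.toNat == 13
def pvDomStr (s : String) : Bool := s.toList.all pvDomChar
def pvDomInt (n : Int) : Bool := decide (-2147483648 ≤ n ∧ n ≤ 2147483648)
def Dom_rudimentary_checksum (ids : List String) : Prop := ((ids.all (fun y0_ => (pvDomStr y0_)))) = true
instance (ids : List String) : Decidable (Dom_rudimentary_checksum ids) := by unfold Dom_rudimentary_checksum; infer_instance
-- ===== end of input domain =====

-- B inlines the helper and counts letter multiplicities per id via sorting + run lengths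
-- (itertools.groupby) collected into a set, instead of A's dict-building pass plus a key scan.


-- ===== PORT A =====
-- for c in string: build the count dict; then scan the keys for a count equal to n
def exactly_n_letter (string : String) (n : Int) : Bool :=
  let chars := string.toList.foldl
    (fun (d : PySem.Dict Char Int) c =>
      if d.contains c then d.insert c (d.getD c 0 + 1) else d.insert c 1)
    PySem.Dict.empty
  chars.keys.any (fun c => chars.getD c 0 == n)

def rudimentary_checksum (ids : List String) : Int :=
  let p := ids.foldl
    (fun (p : Int × Int) idx =>
      ((if exactly_n_letter idx 2 then p.1 + 1 else p.1),
       (if exactly_n_letter idx 3 then p.2 + 1 else p.2)))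
    (0, 0)
  p.1 * p.2

-- ===== PORT B =====
-- run lengths of consecutive equal elements: len(list(g)) for _, g in groupby(l)
def runLens (l : List Char) : List Int :=
  match l with
  | [] => []
  | c :: rest =>
    (((rest.takeWhile (· == c)).length : Int) + 1) :: runLens (rest.dropWhile (· == c))
termination_by l.length
decreasing_by
  simp only [List.length_cons]
  exact Nat.lt_succ_of_le (rest.dropWhile_sublist (· == c)).length_le

def rudimentary_checksum_alt (ids : List String) : Int :=
  let p := ids.foldl
    (fun (p : Int × Int) idx =>
      let lens : PySem.Set Int :=
        PySem.Set.ofList (runLens (PySem.List.sorted idx.toList (fun x => x) false))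
      ((if (2 : Int) ∈ lens then p.1 + 1 else p.1),
       (if (3 : Int) ∈ lens then p.2 + 1 else p.2)))
    (0, 0)
  p.1 * p.2

-- ===== PRECONDITION & SPEC =====
def Spec_rudimentary_checksum (ids : List String) (out : Int) : Prop := out = rudimentary_checksum_alt ids
instance (ids : List String) (out : Int) : Decidable (Spec_rudimentary_checksum ids out) := by unfold Spec_rudimentary_checksum; infer_instance

-- ===== CLAIM (what is proved, stated in full; the proofs are below) =====
def Claim_equal_rudimentary_checksum : Prop := ∀ (ids : List String), Dom_rudimentary_checksum ids → Spec_rudimentary_checksum ids (rudimentary_checksum ids)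

-- ===== LEMMAS AND PROOFS =====

-- run lengths of a sorted list are exactly the multiplicities of its elements
theorem mem_runLens_iff (l : List Char) (h : l.Pairwise (· ≤ ·)) (n : Int) :
    n ∈ runLens l ↔ ∃ c ∈ l, (l.count c : Int) = n := by
  induction l using runLens.induct with
  | case1 => simp [runLens]
  | case2 c rest ih =>
    rw [runLens]
    have hdecomp : rest = rest.takeWhile (· == c) ++ rest.dropWhile (· == c) :=
      (List.takeWhile_append_dropWhile).symm
    set pre := rest.takeWhile (· == c) with hpredef
    set suf := rest.dropWhile (· == c) with hsufdef
    have hpre : ∀ x ∈ pre, x = c := by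
      intro x hx
      have := List.mem_takeWhile_imp hx
      simpa using this
    have hrest : rest.Pairwise (· ≤ ·) := h.of_cons
    have hcle : ∀ x ∈ rest, c ≤ x := by
      intro x hx; exact (List.pairwise_cons.mp h).1 x hx
    have hsufsub : suf.Sublist rest := rest.dropWhile_sublist (· == c)
    have hsufpw : suf.Pairwise (· ≤ ·) := hrest.sublist hsufsub
    have hcnotin : c ∉ suf := by
      intro hc
      cases hsuf : suf with
      | nil => rw [hsuf] at hc; simp at hc
      | cons d t =>
        have hh := List.head?_dropWhile_not (· == c) rest
        rw [← hsufdef, hsuf] at hh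
        have hdc : d ≠ c := by simpa using hh
        have hdmem : d ∈ rest := hsufsub.mem (by rw [hsuf]; exact List.mem_cons_self)
        have hcd : c ≤ d := hcle d hdmem
        rw [hsuf] at hc
        rcases List.mem_cons.mp hc with rfl | hct
        · exact hdc rfl
        · have hdc' : d ≤ c := (List.pairwise_cons.mp (hsuf ▸ hsufpw)).1 c hct
          exact hdc (le_antisymm hdc' hcd)
    have hprecnt : pre.count c = pre.length := List.count_eq_length.mpr (fun x hx => ((hpre x hx) ▸ rfl))
    have hcountc : (c :: rest).count c = pre.length + 1 := by
      rw [List.count_cons_self, hdecomp, List.count_append, hprecnt,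
          List.count_eq_zero.mpr hcnotin]
    have hcounte : ∀ e ∈ suf, (c :: rest).count e = suf.count e := by
      intro e he
      have hec : e ≠ c := fun hh => hcnotin (hh ▸ he)
      have hpree : pre.count e = 0 := List.count_eq_zero.mpr (fun hh => hec (hpre e hh))
      have h1 : (c :: rest).count e = rest.count e := by simp [Ne.symm hec]
      rw [h1, hdecomp, List.count_append, hpree, Nat.zero_add]
    constructor
    · intro hn
      rcases List.mem_cons.mp hn with rfl | hn'
      · exact ⟨c, List.mem_cons_self, by rw [hcountc]; push_cast; ring⟩
      · rcases (ih hsufpw).mp hn' with ⟨e, he, hce⟩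
        refine ⟨e, List.mem_cons_of_mem _ (hsufsub.mem he), ?_⟩
        rw [hcounte e he]; exact hce
    · rintro ⟨e, he, hce⟩
      by_cases hec : e = c
      · subst hec
        have hn2 : n = (pre.length : Int) + 1 := by
          rw [hcountc] at hce; push_cast at hce; omega
        rw [hn2]
        exact List.mem_cons_self
      · have he'' : e ∈ suf := by
          rcases List.mem_cons.mp he with rfl | he'
          · exact absurd rfl hec
          · rw [hdecomp] at he'
            rcases List.mem_append.mp he' with h1 | h2
            · exact absurd (hpre e h1) hec
            · exact h2
        exact List.mem_cons_of_mem _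
          ((ih hsufpw).mpr ⟨e, he'', by rw [← hcounte e he'']; exact hce⟩)

-- per-id agreement: the dict scan finds a letter with count n iff n is a run length of the sorted id
theorem per_id (s : String) (n : Int) :
    (exactly_n_letter s n = true) ↔
      n ∈ PySem.Set.ofList (runLens (PySem.List.sorted s.toList (fun x => x) false)) := by
  have hstep : (fun (d : PySem.Dict Char Int) c =>
      if d.contains c then d.insert c (d.getD c 0 + 1) else d.insert c 1)
      = (fun (d : PySem.Dict Char Int) c => d.insert c (d.getD c 0 + 1)) := by
    funext d c
    by_cases hc : d.contains c = true
    · simp [hc]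
    · have hc' : d.contains c = false := by simpa using hc
      simp [hc', PySem.Dict.getD_of_not_contains d 0 hc']
  have hchars : s.toList.foldl
      (fun (d : PySem.Dict Char Int) c =>
        if d.contains c then d.insert c (d.getD c 0 + 1) else d.insert c 1)
      PySem.Dict.empty = PySem.Dict.counter s.toList := by
    rw [hstep]; exact PySem.Dict.foldl_insert_getD_add_one_eq_counter s.toList
  have hsorted := PySem.List.sorted_perm s.toList (fun x => x) false
  have hpw : (PySem.List.sorted s.toList (fun x => x) false).Pairwise (· ≤ ·) := by
    have := PySem.List.sorted_pairwise s.toList (fun x => x)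
    simpa using this
  rw [PySem.Set.mem_ofList,
      mem_runLens_iff (PySem.List.sorted s.toList (fun x => x) false) hpw n]
  unfold exactly_n_letter
  simp only [hchars, List.any_eq_true, PySem.Dict.keys_counter, PySem.Set.mem_ofList,
    PySem.Dict.getD_counter, beq_iff_eq]
  constructor
  · rintro ⟨c, hc, hcount⟩
    exact ⟨c, (PySem.List.mem_sorted _ _ _ _).mpr hc, by rw [hsorted.count_eq]; exact hcount⟩
  · rintro ⟨c, hc, hcount⟩
    exact ⟨c, (PySem.List.mem_sorted _ _ _ _).mp hc, by rw [← hsorted.count_eq]; exact hcount⟩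

-- ===== VERDICT (by name: the statement is the Claim_ definition above) =====
theorem rudimentary_checksum_spec : Claim_equal_rudimentary_checksum := by
  intro ids _
  unfold Spec_rudimentary_checksum rudimentary_checksum rudimentary_checksum_alt
  have : (fun (p : Int × Int) idx =>
      ((if exactly_n_letter idx 2 then p.1 + 1 else p.1),
       (if exactly_n_letter idx 3 then p.2 + 1 else p.2)))
      = (fun (p : Int × Int) idx =>
      let lens : PySem.Set Int :=
        PySem.Set.ofList (runLens (PySem.List.sorted idx.toList (fun x => x) false))
      ((if (2 : Int) ∈ lens then p.1 + 1 else p.1),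
       (if (3 : Int) ∈ lens then p.2 + 1 else p.2))) := by
    funext p idx
    simp only
    rw [if_congr (per_id idx 2) rfl rfl, if_congr (per_id idx 3) rfl rfl]
  rw [this]
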